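-- pv_equiv track=rewrite | github.com/tanasa/homework.1 | version_oop/version_OOP.py | calculateGenomePosition
-- ===== SOURCE A (Python) =====
-- def calculateGenomePosition(transcript_modified_string, transcript_position_modified_string, position_start_transcript_on_genome):
--     '''
--     Calculates the genome position corresponding to a given nucleotide position in a modified transcript string.
--
--     Parameters:
--     -----------
--     transcript_modified_string : str
--         The modified transcript string composed of characters 'M', '-', and '+'.
--
--     transcript_position_modified_string : int
--         The 0-based position in the modified transcript.
--
--     position_start_transcript_on_genome : int
--         The starting position of the transcript in the genome.
--
--     Returns:
--     --------
--     int or None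
--         The genome position corresponding to the specified transcript position if found; otherwise, returns None.
--     '''
--
--     current_genome_position = position_start_transcript_on_genome
--     current_position_on_alignment = 0
--
--     for char in transcript_modified_string:
--         if char == 'M':
--             if current_position_on_alignment == transcript_position_modified_string:
--                 return current_genome_position
--             current_position_on_alignment += 1
--             current_genome_position += 1
--         elif char == '-':
--             if current_position_on_alignment == transcript_position_modified_string:
--                 return current_genome_position
--             current_position_on_alignment += 1
--             current_genome_position += 1
--         elif char == '+':
--             current_position_on_alignment += 1
--
--     return None
-- ===== SOURCE B (Python) =====
-- def calculateGenomePosition(transcript_modified_string, transcript_position_modified_string, position_start_transcript_on_genome):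
--     """Filter-first reformulation: index into the alignment-relevant subsequence
--     and count genome-advancing characters in its prefix."""
--     relevant = [c for c in transcript_modified_string if c in 'M-+']
--     t = transcript_position_modified_string
--     if 0 <= t < len(relevant) and relevant[t] != '+':
--         return position_start_transcript_on_genome + sum(1 for c in relevant[:t] if c != '+')
--     return None
-- ===== Notes on version B (the rewrite author's own statement) =====
-- stated objective: simpler
-- what changed: Replaces A's single interleaved scan with early return and two running counters by a filter-then-index decomposition: build the subsequence of alignment characters, index it directly at the target, and count genome-advancing characters in its prefix.
import Mathlib
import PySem

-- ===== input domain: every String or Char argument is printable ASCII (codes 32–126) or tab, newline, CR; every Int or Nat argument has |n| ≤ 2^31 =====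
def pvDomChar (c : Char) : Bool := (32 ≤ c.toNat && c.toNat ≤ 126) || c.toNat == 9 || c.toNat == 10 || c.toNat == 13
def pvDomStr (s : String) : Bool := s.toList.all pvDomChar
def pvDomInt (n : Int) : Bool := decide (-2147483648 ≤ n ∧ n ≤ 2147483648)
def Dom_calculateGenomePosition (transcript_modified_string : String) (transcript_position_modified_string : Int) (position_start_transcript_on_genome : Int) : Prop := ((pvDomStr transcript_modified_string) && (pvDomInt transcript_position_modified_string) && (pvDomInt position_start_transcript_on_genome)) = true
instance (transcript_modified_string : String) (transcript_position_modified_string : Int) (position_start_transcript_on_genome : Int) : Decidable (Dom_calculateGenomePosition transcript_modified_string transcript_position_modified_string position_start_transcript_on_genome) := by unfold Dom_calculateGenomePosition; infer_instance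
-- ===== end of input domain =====

-- B replaces A's interleaved early-return scan with a filter-then-index-and-count decomposition (objective: simpler).


-- ===== PORT A =====
-- the for-loop with early return, as structural recursion over the characters,
-- carrying the two counters (current_genome_position, current_position_on_alignment)
def pvGoA (target : Int) : List Char → Int → Int → Option Int
  | [], _, _ => none
  | c :: rest, genome, align =>
    if c = 'M' then
      if align = target then some genome else pvGoA target rest (genome + 1) (align + 1)
    else if c = '-' then
      if align = target then some genome else pvGoA target rest (genome + 1) (align + 1)
    else if c = '+' then
      pvGoA target rest genome (align + 1)
    else
      pvGoA target rest genome align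

def calculateGenomePosition (transcript_modified_string : String) (transcript_position_modified_string : Int) (position_start_transcript_on_genome : Int) : Option Int :=
  pvGoA transcript_position_modified_string transcript_modified_string.toList position_start_transcript_on_genome 0

-- ===== PORT B =====
def calculateGenomePosition_alt (transcript_modified_string : String) (transcript_position_modified_string : Int) (position_start_transcript_on_genome : Int) : Option Int :=
  let relevant := transcript_modified_string.toList.filter (fun c => c = 'M' ∨ c = '-' ∨ c = '+')
  let t := transcript_position_modified_string
  if 0 ≤ t ∧ t < (relevant.length : Int) ∧ relevant.getD t.toNat '+' ≠ '+' then
    some (position_start_transcript_on_genome + ((relevant.take t.toNat).countP (fun c => c ≠ '+') : Int))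
  else
    none

-- ===== PRECONDITION & SPEC =====
def Spec_calculateGenomePosition (transcript_modified_string : String) (transcript_position_modified_string : Int) (position_start_transcript_on_genome : Int) (out : Option Int) : Prop := out = calculateGenomePosition_alt transcript_modified_string transcript_position_modified_string position_start_transcript_on_genome
instance (transcript_modified_string : String) (transcript_position_modified_string : Int) (position_start_transcript_on_genome : Int) (out : Option Int) : Decidable (Spec_calculateGenomePosition transcript_modified_string transcript_position_modified_string position_start_transcript_on_genome out) := by unfold Spec_calculateGenomePosition; infer_instance

-- ===== CLAIM (what is proved, stated in full; the proofs are below) =====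
def Claim_equal_calculateGenomePosition : Prop := ∀ (transcript_modified_string : String) (transcript_position_modified_string : Int) (position_start_transcript_on_genome : Int), Dom_calculateGenomePosition transcript_modified_string transcript_position_modified_string position_start_transcript_on_genome → Spec_calculateGenomePosition transcript_modified_string transcript_position_modified_string position_start_transcript_on_genome (calculateGenomePosition transcript_modified_string transcript_position_modified_string position_start_transcript_on_genome)

-- ===== LEMMAS AND PROOFS =====

-- B's core on an already-filtered list, parametrised by the (shifted) target
def pvAltCore (rel : List Char) (t start : Int) : Option Int :=
  if 0 ≤ t ∧ t < (rel.length : Int) ∧ rel.getD t.toNat '+' ≠ '+' then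
    some (start + ((rel.take t.toNat).countP (fun c => c ≠ '+') : Int))
  else
    none

theorem pvAltCore_eq_alt (s : String) (t g : Int) :
    calculateGenomePosition_alt s t g = pvAltCore (s.toList.filter (fun c => c = 'M' ∨ c = '-' ∨ c = '+')) t g := rfl

theorem pvAltCore_cons_nonplus (c : Char) (hc : c ≠ '+') (rel : List Char) (u g : Int) (hu : u ≠ 0) :
    pvAltCore (c :: rel) u g = pvAltCore rel (u - 1) (g + 1) := by
  unfold pvAltCore
  by_cases h0 : 1 ≤ u
  · have h1 : u.toNat = (u - 1).toNat + 1 := by omega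
    have hg : (c :: rel).getD u.toNat '+' = rel.getD (u - 1).toNat '+' := by
      rw [h1, List.getD_cons_succ]
    have htk : (c :: rel).take u.toNat = c :: rel.take (u - 1).toNat := by
      rw [h1, List.take_succ_cons]
    by_cases hin : 0 ≤ u - 1 ∧ (u - 1) < (rel.length : Int) ∧ rel.getD (u - 1).toNat '+' ≠ '+'
    · rw [if_pos ⟨by omega, by push_cast [List.length_cons]; omega, by rw [hg]; exact hin.2.2⟩,
        if_pos hin, htk]
      rw [List.countP_cons]
      simp only [hc, ne_eq, decide_not]
      congr 1
      norm_num
      omega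
    · rw [if_neg ?_, if_neg hin]
      intro h
      exact hin ⟨by omega, by have := h.2.1; push_cast [List.length_cons] at this; omega,
        by rw [hg] at h; exact h.2.2⟩
  · rw [if_neg (by omega), if_neg (by omega)]

theorem pvAltCore_cons_plus (rel : List Char) (u g : Int) :
    pvAltCore ('+' :: rel) u g = pvAltCore rel (u - 1) g := by
  unfold pvAltCore
  by_cases h0 : 1 ≤ u
  · have h1 : u.toNat = (u - 1).toNat + 1 := by omega
    have hg : ('+' :: rel).getD u.toNat '+' = rel.getD (u - 1).toNat '+' := by
      rw [h1, List.getD_cons_succ]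
    have htk : ('+' :: rel).take u.toNat = '+' :: rel.take (u - 1).toNat := by
      rw [h1, List.take_succ_cons]
    by_cases hin : 0 ≤ u - 1 ∧ (u - 1) < (rel.length : Int) ∧ rel.getD (u - 1).toNat '+' ≠ '+'
    · rw [if_pos ⟨by omega, by push_cast [List.length_cons]; omega, by rw [hg]; exact hin.2.2⟩,
        if_pos hin, htk]
      rw [List.countP_cons]
      simp
    · rw [if_neg ?_, if_neg hin]
      intro h
      exact hin ⟨by omega, by have := h.2.1; push_cast [List.length_cons] at this; omega,
        by rw [hg] at h; exact h.2.2⟩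
  · by_cases hz : u = 0
    · subst hz
      rw [if_neg (by simp), if_neg (by omega)]
    · rw [if_neg (by omega), if_neg (by omega)]

theorem pvGoA_eq_core (l : List Char) : ∀ (t g a : Int),
    pvGoA t l g a = pvAltCore (l.filter (fun c => c = 'M' ∨ c = '-' ∨ c = '+')) (t - a) g := by
  induction l with
  | nil => intro t g a; simp [pvGoA, pvAltCore]
  | cons c rest ih =>
    intro t g a
    have h2 : t - (a + 1) = t - a - 1 := by ring
    by_cases hM : c = 'M'
    · subst hM
      have hfil : List.filter (fun c => decide (c = 'M' ∨ c = '-' ∨ c = '+')) ('M' :: rest)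
          = 'M' :: List.filter (fun c => decide (c = 'M' ∨ c = '-' ∨ c = '+')) rest := by simp
      rw [hfil]
      by_cases he : a = t
      · subst he
        simp [pvGoA, pvAltCore]
      · have hA : pvGoA t ('M' :: rest) g a = pvGoA t rest (g + 1) (a + 1) := by
          simp [pvGoA, he]
        rw [hA, ih, pvAltCore_cons_nonplus 'M' (by decide) _ _ _ (by omega), h2]
    · by_cases hD : c = '-'
      · subst hD
        have hfil : List.filter (fun c => decide (c = 'M' ∨ c = '-' ∨ c = '+')) ('-' :: rest)
            = '-' :: List.filter (fun c => decide (c = 'M' ∨ c = '-' ∨ c = '+')) rest := by simp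
        rw [hfil]
        by_cases he : a = t
        · subst he
          simp [pvGoA, pvAltCore]
        · have hA : pvGoA t ('-' :: rest) g a = pvGoA t rest (g + 1) (a + 1) := by
            simp [pvGoA, he]
          rw [hA, ih, pvAltCore_cons_nonplus '-' (by decide) _ _ _ (by omega), h2]
      · by_cases hP : c = '+'
        · subst hP
          have hfil : List.filter (fun c => decide (c = 'M' ∨ c = '-' ∨ c = '+')) ('+' :: rest)
              = '+' :: List.filter (fun c => decide (c = 'M' ∨ c = '-' ∨ c = '+')) rest := by simp
          have hA : pvGoA t ('+' :: rest) g a = pvGoA t rest g (a + 1) := by simp [pvGoA]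
          rw [hfil, hA, ih, pvAltCore_cons_plus, h2]
        · have hfil : List.filter (fun c => decide (c = 'M' ∨ c = '-' ∨ c = '+')) (c :: rest)
              = List.filter (fun c => decide (c = 'M' ∨ c = '-' ∨ c = '+')) rest := by
            simp [hM, hD, hP]
          have hA : pvGoA t (c :: rest) g a = pvGoA t rest g a := by
            simp [pvGoA, hM, hD, hP]
          rw [hfil, hA, ih]

-- ===== VERDICT (by name: the statement is the Claim_ definition above) =====
theorem calculateGenomePosition_spec : Claim_equal_calculateGenomePosition := by
  intro s t g _
  unfold Spec_calculateGenomePosition calculateGenomePosition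
  rw [pvAltCore_eq_alt, pvGoA_eq_core]
  norm_num
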